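-- pv_equiv track=rewrite | github.com/ipzero209/dns_shim | dga.py | genDomain
-- ===== SOURCE A (Python) =====
-- def genDomain(day, hour, minute):
--     domain = ""
--
--     for i in range(24):
--         day = ((day ^ 8 * day) >> 11) ^ ((day & 0xFFFFFFF0) << 17)
--         hour = ((hour ^ 4 * hour) >> 25) ^ 16 * (hour & 0xFFFFFFF8)
--         minute = ((minute ^ (minute << 13)) >> 19) ^ ((minute & 0xFFFFFFFE) << 12)
--         domain += chr(((day ^ hour ^ minute) % 25) + 97)
--     domain = domain + ".haxor"
--     return domain
-- ===== SOURCE B (Python) =====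
-- def genDomain(day, hour, minute):
--     days = []
--     for _ in range(24):
--         day = ((day ^ 8 * day) >> 11) ^ ((day & 0xFFFFFFF0) << 17)
--         days.append(day)
--     hours = []
--     for _ in range(24):
--         hour = ((hour ^ 4 * hour) >> 25) ^ 16 * (hour & 0xFFFFFFF8)
--         hours.append(hour)
--     minutes = []
--     for _ in range(24):
--         minute = ((minute ^ (minute << 13)) >> 19) ^ ((minute & 0xFFFFFFFE) << 12)
--         minutes.append(minute)
--     letters = [chr(((d ^ h ^ m) % 25) + 97) for d, h, m in zip(days, hours, minutes)]
--     return "".join(letters) + ".haxor"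
-- ===== Notes on version B (the rewrite author's own statement) =====
-- stated objective: alternative
-- what changed: A's single interleaved 24-iteration loop mutating day/hour/minute while building the string is replaced by three independent passes that precompute the 24 successive states of each recurrence into lists, followed by one zip-combine pass producing the letters.
import Mathlib
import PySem

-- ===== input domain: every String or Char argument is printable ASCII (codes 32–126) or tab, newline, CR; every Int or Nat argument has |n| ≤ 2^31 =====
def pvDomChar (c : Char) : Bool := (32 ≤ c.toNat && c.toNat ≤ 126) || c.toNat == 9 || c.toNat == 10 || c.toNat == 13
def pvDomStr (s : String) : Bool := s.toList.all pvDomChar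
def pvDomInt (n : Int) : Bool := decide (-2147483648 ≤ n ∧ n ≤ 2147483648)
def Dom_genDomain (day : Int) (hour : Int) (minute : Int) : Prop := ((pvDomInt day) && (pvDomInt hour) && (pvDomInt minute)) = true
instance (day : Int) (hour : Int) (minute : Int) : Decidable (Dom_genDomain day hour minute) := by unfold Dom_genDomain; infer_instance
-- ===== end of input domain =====

-- B splits A's single interleaved 24-step loop into three independent state-list passes plus a zip/combine pass (objective: alternative decomposition, same cost).

-- ===== PORT A =====
-- literal port of A's single loop: state (day, hour, minute, domain), 24 iterations
def genDomainLoop : Nat → Int → Int → Int → String → String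
  | 0, _, _, _, domain => domain
  | Nat.succ n, day, hour, minute, domain =>
    let day' := PySem.Int.bxor ((PySem.Int.bxor day (8 * day)) >>> 11) ((PySem.Int.band day 0xFFFFFFF0) <<< 17)
    let hour' := PySem.Int.bxor ((PySem.Int.bxor hour (4 * hour)) >>> 25) (16 * (PySem.Int.band hour 0xFFFFFFF8))
    let minute' := PySem.Int.bxor ((PySem.Int.bxor minute (minute <<< 13)) >>> 19) ((PySem.Int.band minute 0xFFFFFFFE) <<< 12)
    genDomainLoop n day' hour' minute'
      (domain.push (Char.ofNat (PySem.Int.mod (PySem.Int.bxor day' (PySem.Int.bxor hour' minute')) 25 + 97).toNat))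

def genDomain (day : Int) (hour : Int) (minute : Int) : String :=
  genDomainLoop 24 day hour minute "" ++ ".haxor"

-- ===== PORT B =====
def stepDay (day : Int) : Int :=
  PySem.Int.bxor ((PySem.Int.bxor day (8 * day)) >>> 11) ((PySem.Int.band day 0xFFFFFFF0) <<< 17)
def stepHour (hour : Int) : Int :=
  PySem.Int.bxor ((PySem.Int.bxor hour (4 * hour)) >>> 25) (16 * (PySem.Int.band hour 0xFFFFFFF8))
def stepMinute (minute : Int) : Int :=
  PySem.Int.bxor ((PySem.Int.bxor minute (minute <<< 13)) >>> 19) ((PySem.Int.band minute 0xFFFFFFFE) <<< 12)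

-- the list of the n successive states of f starting after one application to s
def states (f : Int → Int) : Nat → Int → List Int
  | 0, _ => []
  | Nat.succ n, s => f s :: states f n (f s)

def combChar (d h m : Int) : Char :=
  Char.ofNat (PySem.Int.mod (PySem.Int.bxor d (PySem.Int.bxor h m)) 25 + 97).toNat

def genDomain_alt (day : Int) (hour : Int) (minute : Int) : String :=
  String.ofList (List.zipWith3 combChar (states stepDay 24 day) (states stepHour 24 hour) (states stepMinute 24 minute))
    ++ ".haxor"

-- ===== PRECONDITION & SPEC =====
def Spec_genDomain (day : Int) (hour : Int) (minute : Int) (out : String) : Prop := out = genDomain_alt day hour minute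
instance (day : Int) (hour : Int) (minute : Int) (out : String) : Decidable (Spec_genDomain day hour minute out) := by unfold Spec_genDomain; infer_instance

-- ===== CLAIM (what is proved, stated in full; the proofs are below) =====
def Claim_equal_genDomain : Prop := ∀ (day : Int) (hour : Int) (minute : Int), Dom_genDomain day hour minute → Spec_genDomain day hour minute (genDomain day hour minute)

-- ===== LEMMAS AND PROOFS =====
theorem push_append_mk (s : String) (c : Char) (l : List Char) :
    (s.push c) ++ String.ofList l = s ++ String.ofList (c :: l) := by
  apply String.toList_inj.mp
  simp

theorem loop_eq_states (n : Nat) : ∀ (d h m : Int) (acc : String),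
    genDomainLoop n d h m acc =
      acc ++ String.ofList (List.zipWith3 combChar (states stepDay n d) (states stepHour n h) (states stepMinute n m)) := by
  induction n with
  | zero => intro d h m acc; simp [genDomainLoop, states]
  | succ n ih =>
    intro d h m acc
    rw [genDomainLoop, show states stepDay (n+1) d = stepDay d :: states stepDay n (stepDay d) from rfl,
        show states stepHour (n+1) h = stepHour h :: states stepHour n (stepHour h) from rfl,
        show states stepMinute (n+1) m = stepMinute m :: states stepMinute n (stepMinute m) from rfl,
        List.zipWith3, ← push_append_mk]
    exact ih (stepDay d) (stepHour h) (stepMinute m) _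

-- ===== VERDICT (by name: the statement is the Claim_ definition above) =====
theorem genDomain_spec : Claim_equal_genDomain := by
  intro day hour minute _
  unfold Spec_genDomain genDomain genDomain_alt
  rw [loop_eq_states]
  simp
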